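-- pv_equiv track=rewrite | github.com/trosine/advent-of-code | 2016/day25.py | fast_solve
-- ===== SOURCE A (Python) =====
-- REGISTERS = {
--     'a': 0,
--     'b': 0,
--     'c': 0,
--     'd': 0,
--     'p': 0,
--     }
--
-- def fast_solve(program):
--     """Solve via simple math"""
--     offset = program[1][1] * program[2][1]
--     # make sure we start testing even numbers
--     # if the offset is odd, we add odd numbers
--     # if the offset is even, we add even numbers
--     start = offset % 2
--     while True:
--         start += 2
--         test = start + offset
--         compare = 0
--         valid = True
--         while test:
--             last = test % 2
--             if last != compare:
--                 valid = False
--                 break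
--             test //= 2
--             compare = 1 - compare
--         if valid and last == 1:
--             return start
--     return REGISTERS['a']
-- ===== SOURCE B (Python) =====
-- def fast_solve(program):
--     """Solve via simple math"""
--     offset = program[1][1] * program[2][1]
--     # smallest number of binary shape 1010...10 that the search could accept
--     target = 2
--     while target < offset + offset % 2 + 2:
--         target = 4 * target + 2
--     return target - offset
-- ===== Notes on version B (the rewrite author's own statement) =====
-- stated objective: faster
-- what changed: Instead of scanning every even candidate start+offset and checking its bits one by one, B constructs the smallest alternating-bits number >= offset + offset % 2 + 2 directly by growing the pattern 10, 1010, 101010, ... (target -> 4*target+2) and returns it minus offset.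
-- intended difference: On programs whose offset = program[1][1]*program[2][1] satisfies offset + offset % 2 <= -4, A's search reaches test == 0 and accepts it through the leftover 'last' bit of the previous iteration, returning -offset even though 0 is not an alternating-bits number; B returns 2 - offset (2 being the smallest alternating-bits number), which is the intended value. — e.g. on fast_solve([[0, 0], [0, 1], [0, -4]]): A returns 4, B returns 6
import Mathlib
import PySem

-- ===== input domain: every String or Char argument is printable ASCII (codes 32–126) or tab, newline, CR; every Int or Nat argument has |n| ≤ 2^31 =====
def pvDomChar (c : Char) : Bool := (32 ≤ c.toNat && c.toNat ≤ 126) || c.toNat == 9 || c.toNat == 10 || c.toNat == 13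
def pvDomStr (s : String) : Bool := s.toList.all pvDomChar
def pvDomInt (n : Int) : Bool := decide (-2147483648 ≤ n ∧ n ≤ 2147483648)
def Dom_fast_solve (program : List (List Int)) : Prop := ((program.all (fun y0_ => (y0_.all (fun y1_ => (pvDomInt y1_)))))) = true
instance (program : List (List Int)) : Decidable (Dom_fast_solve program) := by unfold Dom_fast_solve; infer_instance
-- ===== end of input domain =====

-- B computes the answer by growing the alternating bit pattern directly (target -> 4*target+2)
-- instead of testing every even candidate bit by bit; return-value equivalence outside D_.

-- offset = program[1][1] * program[2][1], shared by both ports (Python indexing errors are excluded by Pre_)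
def pvOffset (program : List (List Int)) : Int :=
  ((PySem.List.pyGet? ((PySem.List.pyGet? program 1).getD []) 1).getD 0) *
  ((PySem.List.pyGet? ((PySem.List.pyGet? program 2).getD []) 1).getD 0)

-- ===== PORT A =====
-- inner 'while test:' loop, returning (valid, last); fuel is a totality guard only
def pvInner (fuel : Nat) (test compare last : Int) : Bool × Int :=
  match fuel with
  | 0 => (false, last)
  | fuel + 1 =>
    if test ≠ 0 then
      let last' := PySem.Int.mod test 2
      if last' ≠ compare then (false, last')
      else pvInner fuel (PySem.Int.floordiv test 2) (1 - compare) last'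
    else (true, last)

-- outer 'while True:' loop; 'last' is threaded between iterations as in Python; fuel is a totality guard only
def pvSearch (fuel : Nat) (offset start last : Int) : Int :=
  match fuel with
  | 0 => 0
  | fuel + 1 =>
    let start' := start + 2
    let test := start' + offset
    let r := pvInner (test.natAbs + 4) test 0 last
    if r.1 && r.2 == 1 then start' else pvSearch fuel offset start' r.2

-- Python's 'last' is unbound before the first inner iteration (it is read at test == 0 only when
-- offset ∈ {-2,-3}, where Python raises UnboundLocalError — excluded by Pre_); the port seeds it with 0.
def fast_solve (program : List (List Int)) : Int :=
  let offset := pvOffset program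
  pvSearch (2 * offset.natAbs + 16) offset (PySem.Int.mod offset 2) 0

-- ===== PORT B =====
-- grow the pattern 10, 1010, 101010, ... until it reaches the first admissible test value
def pvGrow (fuel : Nat) (bound target : Int) : Int :=
  match fuel with
  | 0 => target
  | fuel + 1 => if target < bound then pvGrow fuel bound (4 * target + 2) else target

def fast_solve_alt (program : List (List Int)) : Int :=
  let offset := pvOffset program
  pvGrow (offset.natAbs + 4) (offset + PySem.Int.mod offset 2 + 2) 2 - offset

-- ===== PRECONDITION & SPEC =====
-- Pre_ excludes exactly the inputs where A raises: programs too short for program[1][1] / program[2][1]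
-- (IndexError) and offset ∈ {-2, -3}, where A reads 'last' before assignment (UnboundLocalError).
def Pre_fast_solve (program : List (List Int)) : Prop :=
  3 ≤ program.length ∧
  2 ≤ ((PySem.List.pyGet? program 1).getD []).length ∧
  2 ≤ ((PySem.List.pyGet? program 2).getD []).length ∧
  pvOffset program ≠ -2 ∧ pvOffset program ≠ -3
instance (program : List (List Int)) : Decidable (Pre_fast_solve program) := by
  unfold Pre_fast_solve; infer_instance
def pvWitness_fast_solve : List (List Int) := [[9, 9], [0, 3], [0, 5]]

-- On programs whose offset = program[1][1]*program[2][1] has offset + offset % 2 ≤ -4, A's search reaches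
-- test == 0 and accepts it through the leftover 'last' bit of the previous iteration, returning -offset even
-- though 0 is not an alternating-bits number; B returns 2 - offset (2 = smallest alternating-bits number),
-- which is the intended value.
def D_fast_solve (program : List (List Int)) : Prop :=
  pvOffset program + pvOffset program % 2 ≤ -4
instance (program : List (List Int)) : Decidable (D_fast_solve program) := by
  unfold D_fast_solve; infer_instance

def Spec_fast_solve (program : List (List Int)) (out : Int) : Prop :=
  ¬ D_fast_solve program → out = fast_solve_alt program
instance (program : List (List Int)) (out : Int) : Decidable (Spec_fast_solve program out) := by
  unfold Spec_fast_solve; infer_instance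

def pvDiffWitness_fast_solve : List (List Int) := [[0, 0], [0, 1], [0, -4]]
def pvDiffWitnessOut_fast_solve : Int × Int := (4, 6)

-- ===== CLAIM (what is proved, stated in full; the proofs are below) =====
def Claim_unchanged_fast_solve : Prop := ∀ (program : List (List Int)), Dom_fast_solve program → Pre_fast_solve program → Spec_fast_solve program (fast_solve program)
def Claim_changed_fast_solve : Prop := Dom_fast_solve (pvDiffWitness_fast_solve) ∧ Pre_fast_solve (pvDiffWitness_fast_solve) ∧ D_fast_solve (pvDiffWitness_fast_solve) ∧ fast_solve (pvDiffWitness_fast_solve) = pvDiffWitnessOut_fast_solve.1 ∧ fast_solve_alt (pvDiffWitness_fast_solve) = pvDiffWitnessOut_fast_solve.2 ∧ pvDiffWitnessOut_fast_solve.1 ≠ pvDiffWitnessOut_fast_solve.2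
def Claim_exact_fast_solve : Prop := ∀ (program : List (List Int)), Dom_fast_solve program → Pre_fast_solve program → D_fast_solve program → fast_solve program ≠ fast_solve_alt program
-- ===== LEMMAS AND PROOFS =====

theorem pvmod2 (t : Int) : PySem.Int.mod t 2 = t % 2 :=
  PySem.Int.mod_eq_emod_of_pos (by norm_num)

theorem inner_zero (fuel : Nat) (c l : Int) : pvInner (fuel + 1) 0 c l = (true, l) := by
  simp [pvInner]

theorem inner_step (fuel : Nat) (t c l : Int) (ht : t ≠ 0) (hm : t % 2 = c) :
    pvInner (fuel + 1) t c l = pvInner fuel (t / 2) (1 - c) (t % 2) := by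
  simp [pvInner, ht, hm]

theorem inner_break (fuel : Nat) (t c l : Int) (ht : t ≠ 0) (hm : t % 2 ≠ c) :
    pvInner (fuel + 1) t c l = (false, t % 2) := by
  simp [pvInner, ht, hm]

-- the chain 2, 10, 42, … of numbers with binary shape (10)^k
def pvChain : Nat → Int
  | 0 => 2
  | k + 1 => 4 * pvChain k + 2

theorem pvChain_ge (k : Nat) : 2 * (k : Int) + 2 ≤ pvChain k := by
  induction k with
  | zero => simp [pvChain]
  | succ k ih => simp only [pvChain]; push_cast; omega

theorem pvChain_even (k : Nat) : pvChain k % 2 = 0 := by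
  cases k with
  | zero => simp [pvChain]
  | succ k => simp only [pvChain]; omega

theorem pvChain_lt_succ (k : Nat) : pvChain k < pvChain (k + 1) := by
  have := pvChain_ge k
  simp only [pvChain]
  omega

theorem pvChain_mono {j k : Nat} (h : j ≤ k) : pvChain j ≤ pvChain k := by
  induction k with
  | zero =>
      have : j = 0 := by omega
      subst this; exact le_refl _
  | succ k ih =>
      rcases Nat.lt_or_ge j (k + 1) with h' | h'
      · have h1 := pvChain_lt_succ k
        have h2 := ih (by omega)
        omega
      · have : j = k + 1 := by omega
        subst this; exact le_refl _

theorem inner_chain : ∀ (k : Nat) (l : Int) (fuel : Nat), 2 * k + 3 ≤ fuel →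
    pvInner fuel (pvChain k) 0 l = (true, 1) := by
  intro k
  induction k with
  | zero =>
      intro l fuel hf
      obtain ⟨f, rfl⟩ : ∃ f, fuel = f + 3 := ⟨fuel - 3, by omega⟩
      show pvInner (f + 2 + 1) 2 0 l = (true, 1)
      rw [inner_step _ 2 0 l (by norm_num) (by norm_num)]
      rw [show (2 : Int) / 2 = 1 by norm_num, show (2 : Int) % 2 = 0 by norm_num]
      rw [show f + 2 = f + 1 + 1 by omega, inner_step _ 1 (1 - 0) 0 (by norm_num) (by norm_num)]
      rw [show (1 : Int) / 2 = 0 by norm_num, show (1 : Int) % 2 = 1 by norm_num,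
        show (1 : Int) - (1 - 0) = 0 by norm_num]
      exact inner_zero f 0 1
  | succ k ih =>
      intro l fuel hf
      obtain ⟨f, rfl⟩ : ∃ f, fuel = f + 2 := ⟨fuel - 2, by omega⟩
      have hc := pvChain_ge k
      show pvInner (f + 1 + 1) (pvChain (k + 1)) 0 l = (true, 1)
      simp only [pvChain]
      rw [inner_step _ _ 0 l (by omega) (by omega)]
      rw [show (4 * pvChain k + 2) / 2 = 2 * pvChain k + 1 by omega,
        show (4 * pvChain k + 2) % 2 = 0 by omega]
      rw [inner_step _ _ (1 - 0) 0 (by omega) (by omega)]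
      rw [show (2 * pvChain k + 1) / 2 = pvChain k by omega,
        show (2 * pvChain k + 1) % 2 = 1 by omega,
        show (1 : Int) - (1 - 0) = 0 by norm_num]
      exact ih 1 f (by omega)

theorem inner_reject : ∀ (N : Nat) (t l : Int) (fuel : Nat), t.natAbs ≤ N → 0 < t →
    t % 2 = 0 → (∀ k, pvChain k ≠ t) → t.natAbs + 3 ≤ fuel →
    (pvInner fuel t 0 l).1 = false ∨ (pvInner fuel t 0 l).2 ≠ 1 := by
  intro N
  induction N with
  | zero => intro t l fuel hN ht _ _ _; omega
  | succ N ih =>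
      intro t l fuel hN ht he hch hf
      have ht2 : t ≠ 2 := fun h => hch 0 (by simp [pvChain, h])
      have ht4 : 4 ≤ t := by omega
      obtain ⟨f, rfl⟩ : ∃ f, fuel = f + 4 := ⟨fuel - 4, by omega⟩
      rw [show f + 4 = (f + 3) + 1 by omega, inner_step _ t 0 l (by omega) he]
      set u := t / 2 with hu
      have hu2 : 2 ≤ u := by omega
      by_cases hue : u % 2 = 1 - 0
      · rw [show f + 3 = (f + 2) + 1 by omega, inner_step _ u (1 - 0) (t % 2) (by omega) hue]
        set v := u / 2 with hv
        have hveq : t = 4 * v + 2 := by omega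
        have hv1 : 1 ≤ v := by omega
        rw [show (1 : Int) - (1 - 0) = 0 by norm_num]
        by_cases hvo : v % 2 = 0
        · have hvch : ∀ k, pvChain k ≠ v := fun k hk =>
            hch (k + 1) (by simp only [pvChain, hk]; omega)
          exact ih v (u % 2) (f + 2) (by omega) (by omega) hvo hvch (by omega)
        · rw [show f + 2 = (f + 1) + 1 by omega, inner_break _ v 0 (u % 2) (by omega) (by omega)]
          left; rfl
      · rw [show f + 3 = (f + 2) + 1 by omega, inner_break _ u (1 - 0) (t % 2) (by omega) hue]
        left; rfl

theorem inner_neg : ∀ (N : Nat) (t l : Int) (fuel : Nat), t.natAbs ≤ N → t < 0 →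
    t.natAbs + 3 ≤ fuel → (pvInner fuel t 0 l).1 = false := by
  intro N
  induction N with
  | zero => intro t l fuel hN ht _; omega
  | succ N ih =>
      intro t l fuel hN ht hf
      obtain ⟨f, rfl⟩ : ∃ f, fuel = f + 4 := ⟨fuel - 4, by omega⟩
      by_cases hte : t % 2 = 0
      · rw [show f + 4 = (f + 3) + 1 by omega, inner_step _ t 0 l (by omega) hte]
        set u := t / 2 with hu
        have hun : u < 0 := by omega
        by_cases hue : u % 2 = 1 - 0
        · rw [show f + 3 = (f + 2) + 1 by omega, inner_step _ u (1 - 0) (t % 2) (by omega) hue]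
          set v := u / 2 with hv
          have hvn : v < 0 := by omega
          rw [show (1 : Int) - (1 - 0) = 0 by norm_num]
          by_cases hvo : v % 2 = 0
          · exact ih v (u % 2) (f + 2) (by omega) hvn (by omega)
          · rw [show f + 2 = (f + 1) + 1 by omega, inner_break _ v 0 (u % 2) (by omega) (by omega)]
        · rw [show f + 3 = (f + 2) + 1 by omega, inner_break _ u (1 - 0) (t % 2) (by omega) hue]
      · rw [show f + 4 = (f + 3) + 1 by omega, inner_break _ t 0 l (by omega) (by omega)]

theorem inner_neg_two (f : Nat) (l : Int) : pvInner (f + 3) (-2) 0 l = (false, 1) := by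
  rw [show f + 3 = (f + 2) + 1 by omega, inner_step _ (-2) 0 l (by norm_num) (by decide)]
  rw [show (-2 : Int) / 2 = -1 by decide, show (-2 : Int) % 2 = 0 by decide,
    show f + 2 = (f + 1) + 1 by omega, inner_step _ (-1) (1 - 0) 0 (by norm_num) (by decide)]
  rw [show (-1 : Int) / 2 = -1 by decide, show (-1 : Int) % 2 = 1 by decide,
    show (1 : Int) - (1 - 0) = 0 by norm_num]
  rw [inner_break f (-1) 0 1 (by norm_num) (by decide)]
  decide

theorem search_step (fuel : Nat) (o start l : Int) :
    pvSearch (fuel + 1) o start l =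
      if (pvInner ((start + 2 + o).natAbs + 4) (start + 2 + o) 0 l).1 &&
          (pvInner ((start + 2 + o).natAbs + 4) (start + 2 + o) 0 l).2 == 1 then
        start + 2
      else
        pvSearch fuel o (start + 2) (pvInner ((start + 2 + o).natAbs + 4) (start + 2 + o) 0 l).2 :=
  rfl

theorem search_loop : ∀ (fuel : Nat) (o start l : Int) (K : Nat),
    (start + 2 + o) % 2 = 0 → 0 < start + 2 + o → start + 2 + o ≤ pvChain K →
    (∀ k, start + 2 + o ≤ pvChain k → pvChain K ≤ pvChain k) →
    pvChain K - (start + 2 + o) < 2 * (fuel : Int) →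
    pvSearch fuel o start l = pvChain K - o := by
  intro fuel
  induction fuel with
  | zero => intro o start l K _ _ h3 _ h5; omega
  | succ fuel ih =>
      intro o start l K h1 h2 h3 h4 h5
      rw [search_step]
      by_cases heq : start + 2 + o = pvChain K
      · have hge := pvChain_ge K
        have hin : pvInner ((start + 2 + o).natAbs + 4) (start + 2 + o) 0 l = (true, 1) := by
          rw [heq]; exact inner_chain K l _ (by omega)
        rw [hin]
        norm_num
        omega
      · have hlt : start + 2 + o < pvChain K := by omega
        have hch : ∀ k, pvChain k ≠ start + 2 + o := by
          intro k hk
          have := h4 k (by omega)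
          omega
        have hrej := inner_reject (start + 2 + o).natAbs (start + 2 + o) l
          ((start + 2 + o).natAbs + 4) (le_refl _) h2 h1 hch (by omega)
        have hcond : ((pvInner ((start + 2 + o).natAbs + 4) (start + 2 + o) 0 l).1 &&
            (pvInner ((start + 2 + o).natAbs + 4) (start + 2 + o) 0 l).2 == 1) = false := by
          rcases hrej with h | h
          · simp [h]
          · simp [h]
        rw [hcond]
        simp only [Bool.false_eq_true, if_false]
        have hTe := pvChain_even K
        exact ih o (start + 2) _ K (by omega) (by omega) (by omega)
          (fun k hk => h4 k (by omega)) (by omega)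

theorem grow_loop : ∀ (fuel : Nat) (bound : Int) (K : Nat), bound ≤ pvChain K →
    (∀ j, j < K → pvChain j < bound) → ∀ j, j ≤ K → K - j < fuel →
    pvGrow fuel bound (pvChain j) = pvChain K := by
  intro fuel
  induction fuel with
  | zero => intro bound K _ _ j hj hf; omega
  | succ fuel ih =>
      intro bound K hK hmin j hj hf
      by_cases h : pvChain j < bound
      · have hjK : j < K := by
          rcases Nat.lt_or_ge j K with h' | h'
          · exact h'
          · have : j = K := by omega
            subst this; omega
        have hstep : (4 * pvChain j + 2) = pvChain (j + 1) := rfl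
        simp only [pvGrow, if_pos h, hstep]
        exact ih bound K hK hmin (j + 1) (by omega) (by omega)
      · have hjK : j = K := by
          rcases Nat.lt_or_ge j K with h' | h'
          · have := hmin j h'; omega
          · omega
        subst hjK
        simp only [pvGrow, if_neg h]

theorem search_neg : ∀ (fuel : Nat) (o start l : Int),
    (start + 2 + o) % 2 = 0 → start + 2 + o ≤ 0 → (start + 2 + o = 0 → l = 1) →
    -(start + 2 + o) < 2 * (fuel : Int) →
    pvSearch fuel o start l = -o := by
  intro fuel
  induction fuel with
  | zero => intro o start l _ h2 _ h4; omega
  | succ fuel ih =>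
      intro o start l h1 h2 h3 h4
      rw [search_step]
      by_cases heq : start + 2 + o = 0
      · have hl := h3 heq
        subst hl
        have hin : pvInner ((start + 2 + o).natAbs + 4) (start + 2 + o) 0 1 = (true, 1) := by
          rw [heq]
          show pvInner 4 0 0 1 = (true, 1)
          exact inner_zero 3 0 1
        rw [hin]
        norm_num
        omega
      · have hneg : start + 2 + o ≤ -2 := by omega
        have hfalse : (pvInner ((start + 2 + o).natAbs + 4) (start + 2 + o) 0 l).1 = false :=
          inner_neg (start + 2 + o).natAbs _ l _ (le_refl _) (by omega) (by omega)
        rw [hfalse]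
        simp only [Bool.false_and, Bool.false_eq_true, if_false]
        refine ih o (start + 2) _ (by omega) (by omega) ?_ (by omega)
        intro h0
        have ht2 : start + 2 + o = -2 := by omega
        rw [ht2]
        show (pvInner (3 + 3) (-2) 0 l).2 = 1
        rw [inner_neg_two 3 l]

theorem fast_solve_def (p : List (List Int)) : fast_solve p =
    pvSearch (2 * (pvOffset p).natAbs + 16) (pvOffset p) (pvOffset p % 2) 0 := by
  simp only [fast_solve, pvmod2]

theorem fast_solve_alt_def (p : List (List Int)) : fast_solve_alt p =
    pvGrow ((pvOffset p).natAbs + 4) (pvOffset p + pvOffset p % 2 + 2) 2 - pvOffset p := by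
  simp only [fast_solve_alt, pvmod2]

-- the main equality on ¬D_: both sides equal (first chain element ≥ offset + offset % 2 + 2) - offset
theorem main_eq (o : Int) (ho : 0 ≤ o + o % 2) :
    pvSearch (2 * o.natAbs + 16) o (o % 2) 0 = pvGrow (o.natAbs + 4) (o + o % 2 + 2) 2 - o := by
  have hb2 : 2 ≤ o + o % 2 + 2 := by omega
  have hex : ∃ k, o + o % 2 + 2 ≤ pvChain k := by
    refine ⟨(o + o % 2 + 2).toNat, ?_⟩
    have := pvChain_ge (o + o % 2 + 2).toNat
    omega
  obtain ⟨K, hK, hmin⟩ : ∃ K, o + o % 2 + 2 ≤ pvChain K ∧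
      ∀ j, j < K → pvChain j < o + o % 2 + 2 :=
    ⟨Nat.find hex, Nat.find_spec hex, fun j hj => by
      have := Nat.find_min hex hj; omega⟩
  have hH : ∀ k, o + o % 2 + 2 ≤ pvChain k → pvChain K ≤ pvChain k := by
    intro k hk
    rcases Nat.lt_or_ge k K with h | h
    · exact absurd hk (by have := hmin k h; omega)
    · exact pvChain_mono h
  have hTup : pvChain K ≤ 4 * (o + o % 2 + 2) + 2 := by
    cases K with
    | zero => simp only [pvChain]; omega
    | succ K' =>
        have h1 := hmin K' (by omega)
        have h2 : pvChain (K' + 1) = 4 * pvChain K' + 2 := rfl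
        omega
  have hKsmall : (K : Int) ≤ o.natAbs + 3 := by
    cases K with
    | zero => omega
    | succ K' =>
        have h1 := hmin K' (by omega)
        have h2 := pvChain_ge K'
        omega
  have hA : pvSearch (2 * o.natAbs + 16) o (o % 2) 0 = pvChain K - o :=
    search_loop (2 * o.natAbs + 16) o (o % 2) 0 K
      (by omega) (by omega) (by omega) (fun k hk => hH k (by omega))
      (by omega)
  have hB : pvGrow (o.natAbs + 4) (o + o % 2 + 2) 2 = pvChain K := by
    have h2 : (2 : Int) = pvChain 0 := rfl
    rw [h2]
    refine grow_loop (o.natAbs + 4) (o + o % 2 + 2) K hK hmin 0 (by omega) (by omega)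
  rw [hA, hB]

-- ===== VERDICT (by name: the statement is the Claim_ definition above) =====
theorem fast_solve_spec : Claim_unchanged_fast_solve := by
  intro program _hdom hpre hnd
  obtain ⟨_, _, _, h2, h3⟩ := hpre
  unfold D_fast_solve at hnd
  have hge : 0 ≤ pvOffset program + pvOffset program % 2 := by omega
  show fast_solve program = fast_solve_alt program
  rw [fast_solve_def, fast_solve_alt_def]
  exact main_eq (pvOffset program) hge

theorem fast_solve_tight : Claim_exact_fast_solve := by
  intro program _hdom _hpre hd
  unfold D_fast_solve at hd
  show fast_solve program ≠ fast_solve_alt program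
  rw [fast_solve_def, fast_solve_alt_def]
  have hA : pvSearch (2 * (pvOffset program).natAbs + 16) (pvOffset program)
      (pvOffset program % 2) 0 = -(pvOffset program) :=
    search_neg _ (pvOffset program) (pvOffset program % 2) 0
      (by omega) (by omega) (by omega) (by omega)
  have hB : pvGrow ((pvOffset program).natAbs + 4)
      (pvOffset program + pvOffset program % 2 + 2) 2 = 2 := by
    obtain ⟨f, hf⟩ : ∃ f, (pvOffset program).natAbs + 4 = f + 1 :=
      ⟨(pvOffset program).natAbs + 3, by omega⟩
    rw [hf]
    simp only [pvGrow,
      if_neg (by omega : ¬ (2 : Int) < pvOffset program + pvOffset program % 2 + 2)]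
  rw [hA, hB]
  omega

theorem fast_solve_changed : Claim_changed_fast_solve := by
  unfold Claim_changed_fast_solve; decide
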